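-- pv_equiv track=rewrite | github.com/timewinder-dev/timewinder-prototype | tests/temporal_fuzz/test_temporal_basics.py | leadsTo_bool
-- ===== SOURCE A (Python) =====
-- from typing import List
--
-- TTrace = List[bool]
--
-- def eventually_bool(l: TTrace) -> bool:
--     return any(l)
--
-- def leadsTo_bool(p, q: TTrace) -> bool:
--     assert len(p) == len(q)
--     if len(p) == 0:
--         return True
--     if p[0] is True:
--         if q[0] is True:
--             return leadsTo_bool(p[1:], q[1:])
--         else:
--             return eventually_bool(q[1:]) and leadsTo_bool(p[1:], q[1:])
--     else:
--         return leadsTo_bool(p[1:], q[1:])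
-- ===== SOURCE B (Python) =====
-- def leadsTo_bool(p, q):
--     assert len(p) == len(q)
--     ok = True
--     seen = False  # whether any q[j] is True for j > current index
--     for pi, qi in zip(reversed(p), reversed(q)):
--         if pi and not qi and not seen:
--             ok = False
--         seen = seen or qi
--     return ok
-- ===== Notes on version B (the rewrite author's own statement) =====
-- stated objective: faster
-- what changed: Replaces the recursion that re-scans the whole tail (eventually_bool(q[1:])) at each index by a single right-to-left loop maintaining a suffix-any flag.
import Mathlib
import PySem

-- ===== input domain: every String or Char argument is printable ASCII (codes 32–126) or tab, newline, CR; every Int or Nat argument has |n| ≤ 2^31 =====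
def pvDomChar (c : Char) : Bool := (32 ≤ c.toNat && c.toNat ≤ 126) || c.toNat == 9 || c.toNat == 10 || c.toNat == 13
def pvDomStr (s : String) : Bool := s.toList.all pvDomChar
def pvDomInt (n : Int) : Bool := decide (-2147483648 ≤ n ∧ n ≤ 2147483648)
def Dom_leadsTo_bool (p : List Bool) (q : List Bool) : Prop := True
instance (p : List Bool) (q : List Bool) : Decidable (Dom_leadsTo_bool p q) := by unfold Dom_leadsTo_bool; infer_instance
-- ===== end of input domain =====

-- B replaces A's recursive slicing (which re-scans the tail via eventually_bool at each
-- True/False position, O(n^2)) by one right-to-left pass with a suffix-any flag (O(n)).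


-- ===== PORT A =====
def eventually_bool (l : List Bool) : Bool := l.any id

def leadsTo_bool (p : List Bool) (q : List Bool) : Bool :=
  match p, q with
  | [], _ => true
  | _ :: ps, [] => true      -- unreachable under Pre_ (the assert requires equal lengths)
  | a :: ps, b :: qs =>
    if a = true then
      if b = true then leadsTo_bool ps qs
      else eventually_bool qs && leadsTo_bool ps qs
    else leadsTo_bool ps qs

-- ===== PORT B =====
-- state = (ok, seen); fold from the right = Python's loop over the reversed lists
def leadsTo_bool_alt (p : List Bool) (q : List Bool) : Bool :=
  ((p.zip q).foldr
    (fun pq st =>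
      (if pq.1 && !pq.2 && !st.2 then false else st.1, st.2 || pq.2))
    (true, false)).1

-- ===== PRECONDITION & SPEC =====
-- Pre_: exactly the inputs on which A's assert len(p) == len(q) passes
def Pre_leadsTo_bool (p : List Bool) (q : List Bool) : Prop := p.length = q.length
instance (p : List Bool) (q : List Bool) : Decidable (Pre_leadsTo_bool p q) := by unfold Pre_leadsTo_bool; infer_instance
def pvWitness_leadsTo_bool : List Bool × List Bool := ([true, false], [false, true])

def Spec_leadsTo_bool (p : List Bool) (q : List Bool) (out : Bool) : Prop := out = leadsTo_bool_alt p q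
instance (p : List Bool) (q : List Bool) (out : Bool) : Decidable (Spec_leadsTo_bool p q out) := by unfold Spec_leadsTo_bool; infer_instance

-- ===== CLAIM (what is proved, stated in full; the proofs are below) =====
def Claim_equal_leadsTo_bool : Prop := ∀ (p : List Bool) (q : List Bool), Dom_leadsTo_bool p q → Pre_leadsTo_bool p q → Spec_leadsTo_bool p q (leadsTo_bool p q)

-- ===== LEMMAS AND PROOFS =====
-- The fold's state: second component is "some q element in the suffix is true",
-- first component is A's answer on the suffix.
theorem leadsTo_fold (p q : List Bool) (h : p.length = q.length) :
    ((p.zip q).foldr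
      (fun pq st =>
        (if pq.1 && !pq.2 && !st.2 then false else st.1, st.2 || pq.2))
      (true, false))
    = (leadsTo_bool p q, q.any id) := by
  induction p generalizing q with
  | nil =>
    cases q with
    | nil => simp [leadsTo_bool]
    | cons b qs => simp at h
  | cons a ps ih =>
    cases q with
    | nil => simp at h
    | cons b qs =>
      simp only [List.length_cons, Nat.add_right_cancel_iff] at h
      simp only [List.zip_cons_cons, List.foldr_cons, ih qs h]
      cases h1 : leadsTo_bool ps qs <;> cases h2 : qs.any id <;> cases a <;> cases b <;>
        simp [leadsTo_bool, eventually_bool, h1, h2]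

-- ===== VERDICT (by name: the statement is the Claim_ definition above) =====
theorem leadsTo_bool_spec : Claim_equal_leadsTo_bool := by
  intro p q _ hpre
  unfold Spec_leadsTo_bool leadsTo_bool_alt
  rw [leadsTo_fold p q hpre]
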